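-- pv_equiv track=rewrite | github.com/AndreiSobo/image_deblurring | src/utils.py | make_tile_coords
-- ===== SOURCE A (Python) =====
-- DEFAULT_TILE_SIZE = 256
--
-- def make_tile_coords(H: int, W: int, tile_size: int = DEFAULT_TILE_SIZE, overlap: int = 64):
--     stride = tile_size - overlap
--     xs = list(range(0, W, stride))
--     ys = list(range(0, H, stride))
--     coords = []
--     for y in ys:
--         for x in xs:
--             x2 = min(x + tile_size, W)
--             y2 = min(y + tile_size, H)
--             x1 = max(0, x2 - tile_size)
--             y1 = max(0, y2 - tile_size)
--             coords.append((x1, y1, x2, y2))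
--     # remove duplicates and keep order
--     seen = set()
--     uniq = []
--     for c in coords:
--         if c not in seen:
--             uniq.append(c)
--             seen.add(c)
--     return uniq
-- ===== SOURCE B (Python) =====
-- DEFAULT_TILE_SIZE = 256
--
-- def make_tile_coords(H: int, W: int, tile_size: int = DEFAULT_TILE_SIZE, overlap: int = 64):
--     stride = tile_size - overlap
--     # dedup each axis independently, then take the product (y outer, x inner)
--     xiv = []
--     seen_x = set()
--     for x in range(0, W, stride):
--         x2 = min(x + tile_size, W)
--         x1 = max(0, x2 - tile_size)
--         if (x1, x2) not in seen_x:
--             seen_x.add((x1, x2))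
--             xiv.append((x1, x2))
--     yiv = []
--     seen_y = set()
--     for y in range(0, H, stride):
--         y2 = min(y + tile_size, H)
--         y1 = max(0, y2 - tile_size)
--         if (y1, y2) not in seen_y:
--             seen_y.add((y1, y2))
--             yiv.append((y1, y2))
--     return [(x1, y1, x2, y2) for (y1, y2) in yiv for (x1, x2) in xiv]
-- ===== Notes on version B (the rewrite author's own statement) =====
-- stated objective: alternative
-- what changed: B deduplicates the x-intervals and the y-intervals separately (one seen-set pass per axis) and emits their cartesian product, instead of generating all N*M tile tuples and deduplicating the 4-tuples; this is equivalent because 4-tuple equality factors over the two axes and the product preserves first-occurrence order.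
import Mathlib
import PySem

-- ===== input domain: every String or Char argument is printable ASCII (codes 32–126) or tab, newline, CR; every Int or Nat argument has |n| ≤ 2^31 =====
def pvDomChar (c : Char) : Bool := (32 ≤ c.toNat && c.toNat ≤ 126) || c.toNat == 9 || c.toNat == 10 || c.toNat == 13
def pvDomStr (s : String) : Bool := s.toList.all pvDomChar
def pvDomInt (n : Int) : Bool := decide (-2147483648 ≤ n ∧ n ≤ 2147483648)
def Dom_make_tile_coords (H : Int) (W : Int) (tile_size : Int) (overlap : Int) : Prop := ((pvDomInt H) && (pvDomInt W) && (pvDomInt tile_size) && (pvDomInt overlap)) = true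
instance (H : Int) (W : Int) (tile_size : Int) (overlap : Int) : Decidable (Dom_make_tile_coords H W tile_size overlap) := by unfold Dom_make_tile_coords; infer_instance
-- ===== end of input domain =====

-- B deduplicates the x-intervals and y-intervals separately and takes their product,
-- instead of generating all N*M tiles and deduplicating the 4-tuples (alternative decomposition).

-- ===== PORT A =====
def make_tile_coords (H : Int) (W : Int) (tile_size : Int) (overlap : Int) : List (Int × Int × Int × Int) :=
  let stride := tile_size - overlap
  let xs := PySem.List.pyRange 0 W stride
  let ys := PySem.List.pyRange 0 H stride
  let coords : List (Int × Int × Int × Int) :=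
    ys.foldl (fun acc y =>
      xs.foldl (fun acc2 x =>
        let x2 := min (x + tile_size) W
        let y2 := min (y + tile_size) H
        let x1 := max 0 (x2 - tile_size)
        let y1 := max 0 (y2 - tile_size)
        acc2 ++ [(x1, y1, x2, y2)]) acc) []
  let fin : PySem.Set (Int × Int × Int × Int) × List (Int × Int × Int × Int) :=
    coords.foldl (fun su c =>
      if PySem.Set.contains su.1 c then su
      else (PySem.Set.add su.1 c, su.2 ++ [c])) (PySem.Set.empty, [])
  fin.2

-- ===== PORT B =====
def make_tile_coords_alt (H : Int) (W : Int) (tile_size : Int) (overlap : Int) : List (Int × Int × Int × Int) :=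
  let stride := tile_size - overlap
  let xfin : PySem.Set (Int × Int) × List (Int × Int) :=
    (PySem.List.pyRange 0 W stride).foldl (fun su x =>
      let x2 := min (x + tile_size) W
      let x1 := max 0 (x2 - tile_size)
      if PySem.Set.contains su.1 (x1, x2) then su
      else (PySem.Set.add su.1 (x1, x2), su.2 ++ [(x1, x2)])) (PySem.Set.empty, [])
  let yfin : PySem.Set (Int × Int) × List (Int × Int) :=
    (PySem.List.pyRange 0 H stride).foldl (fun su y =>
      let y2 := min (y + tile_size) H
      let y1 := max 0 (y2 - tile_size)
      if PySem.Set.contains su.1 (y1, y2) then su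
      else (PySem.Set.add su.1 (y1, y2), su.2 ++ [(y1, y2)])) (PySem.Set.empty, [])
  yfin.2.flatMap (fun q => xfin.2.map (fun p => (p.1, q.1, p.2, q.2)))

-- ===== PRECONDITION & SPEC =====
-- Pre_ excludes exactly tile_size = overlap, where stride = 0 and Python's range(0, W, 0) raises ValueError.
def Pre_make_tile_coords (H : Int) (W : Int) (tile_size : Int) (overlap : Int) : Prop := tile_size ≠ overlap
instance (H : Int) (W : Int) (tile_size : Int) (overlap : Int) : Decidable (Pre_make_tile_coords H W tile_size overlap) := by unfold Pre_make_tile_coords; infer_instance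
def pvWitness_make_tile_coords : Int × Int × Int × Int := (300, 300, 256, 64)
def Spec_make_tile_coords (H : Int) (W : Int) (tile_size : Int) (overlap : Int) (out : List (Int × Int × Int × Int)) : Prop := out = make_tile_coords_alt H W tile_size overlap
instance (H : Int) (W : Int) (tile_size : Int) (overlap : Int) (out : List (Int × Int × Int × Int)) : Decidable (Spec_make_tile_coords H W tile_size overlap out) := by unfold Spec_make_tile_coords; infer_instance

-- ===== CLAIM (what is proved, stated in full; the proofs are below) =====
def Claim_equal_make_tile_coords : Prop := ∀ (H : Int) (W : Int) (tile_size : Int) (overlap : Int), Dom_make_tile_coords H W tile_size overlap → Pre_make_tile_coords H W tile_size overlap → Spec_make_tile_coords H W tile_size overlap (make_tile_coords H W tile_size overlap)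

-- ===== LEMMAS AND PROOFS =====

-- keep-first dedup, recursive characterization: head, then dedup of the tail with the head erased
def pvD {α : Type} [DecidableEq α] : List α → List α
  | [] => []
  | x :: xs => x :: pvD (xs.filter (fun y => y ≠ x))
termination_by l => l.length
decreasing_by
  have h := List.length_filter_le (fun x_1 => decide ((x_1 : {y // y ∈ xs}).1 ≠ x)) xs.attach
  simp [List.length_unattach] at h ⊢
  omega

-- induction principle following pvD's recursion
theorem pvD_ind {α : Type} [DecidableEq α] (P : List α → Prop) (h0 : P [])
    (h1 : ∀ x xs, P (xs.filter (fun y => y ≠ x)) → P (x :: xs)) : ∀ l, P l := by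
  intro l
  induction hn : l.length using Nat.strong_induction_on generalizing l with
  | _ n ih =>
    cases l with
    | nil => exact h0
    | cons x xs =>
      apply h1
      apply ih (xs.filter (fun y => y ≠ x)).length _ _ rfl
      have := List.length_filter_le (fun y => decide (y ≠ x)) xs
      simp at hn
      omega

theorem pvD_nil {α : Type} [DecidableEq α] : pvD ([] : List α) = [] := by rw [pvD]

theorem pvD_cons {α : Type} [DecidableEq α] (x : α) (xs : List α) :
    pvD (x :: xs) = x :: pvD (xs.filter (fun y => y ≠ x)) := by rw [pvD]

-- the seen-set fold computes pvD
theorem pvFoldl_dedup {α : Type} [BEq α] [LawfulBEq α] [DecidableEq α] (l : List α) :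
    ∀ (seen uniq : List α),
      (l.foldl (fun (su : PySem.Set α × List α) c =>
        if PySem.Set.contains su.1 c then su
        else (PySem.Set.add su.1 c, su.2 ++ [c])) (seen, uniq)).2
      = uniq ++ pvD (l.filter (fun c => ¬ c ∈ seen)) := by
  induction l with
  | nil => intro seen uniq; simp [pvD_nil]
  | cons x xs ih =>
    intro seen uniq
    rw [List.foldl_cons, List.filter_cons]
    by_cases hx : x ∈ seen
    · rw [if_pos (show PySem.Set.contains (seen, uniq).1 x = true by
        simpa [PySem.Set.contains] using hx)]
      rw [if_neg (by simp [hx]), ih]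
    · rw [if_neg (show ¬ PySem.Set.contains (seen, uniq).1 x = true by
        simpa [PySem.Set.contains] using hx)]
      have hadd : PySem.Set.add (seen, uniq).1 x = seen ++ [x] := by
        simp [PySem.Set.add, PySem.Set.contains, hx]
      rw [show (PySem.Set.add (seen, uniq).1 x, (seen, uniq).2 ++ [x])
            = ((seen ++ [x] : List α), uniq ++ [x]) by rw [hadd]]
      rw [ih, if_pos (by simp [hx]), pvD_cons]
      have hfil : xs.filter (fun c => ¬ c ∈ seen ++ [x])
          = (xs.filter (fun c => ¬ c ∈ seen)).filter (fun y => y ≠ x) := by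
        rw [List.filter_filter]
        apply List.filter_congr
        intro a _
        by_cases h1 : a = x <;> by_cases h2 : a ∈ seen <;> simp [h1, h2]
      rw [hfil]
      simp

-- pvD commutes with an injective map
theorem pvD_map {α β : Type} [DecidableEq α] [DecidableEq β] (f : α → β)
    (hf : ∀ a b, f a = f b → a = b) (l : List α) :
    pvD (l.map f) = (pvD l).map f := by
  induction l using pvD_ind with
  | h0 => simp [pvD_nil]
  | h1 x xs ih =>
    rw [List.map_cons, pvD_cons, pvD_cons, List.map_cons]
    congr 1
    rw [← ih]
    congr 1
    rw [List.filter_map]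
    congr 1
    apply List.filter_congr
    intro a _
    simp only [Function.comp_apply, ne_eq, decide_not]
    by_cases h : a = x
    · simp [h]
    · have : ¬ f a = f x := fun hc => h (hf _ _ hc)
      simp [h, this]

-- pvD over an append
theorem pvD_append {α : Type} [DecidableEq α] (l r : List α) :
    pvD (l ++ r) = pvD l ++ pvD (r.filter (fun y => ¬ y ∈ l)) := by
  induction l using pvD_ind generalizing r with
  | h0 => simp [pvD_nil]
  | h1 x xs ih =>
    rw [List.cons_append, pvD_cons, pvD_cons, List.cons_append]
    congr 1
    rw [List.filter_append, ih]
    congr 1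
    rw [List.filter_filter]
    congr 1
    apply List.filter_congr
    intro a _
    by_cases h1 : a = x <;> by_cases h2 : a ∈ xs <;> simp [h1, h2]

-- filtering a flatMap whose blocks are kept or dropped wholesale
theorem pvFilter_flatMap_blocks {β γ : Type} (Q : List β) (P : β → List γ) (pr : γ → Bool) (keep : β → Bool)
    (h : ∀ b ∈ Q, (P b).filter pr = if keep b then P b else []) :
    (Q.flatMap P).filter pr = (Q.filter keep).flatMap P := by
  induction Q with
  | nil => simp
  | cons b bs ih =>
    rw [List.flatMap_cons, List.filter_append, h b (by simp), List.filter_cons]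
    have ih' := ih (fun b' hb' => h b' (by simp [hb']))
    by_cases hk : keep b = true <;> simp [hk, ih']

-- the pairing used by the tile tuples
def pvComb (p q : Int × Int) : Int × Int × Int × Int := (p.1, q.1, p.2, q.2)

theorem pvComb_inj (p q p' q' : Int × Int) (h : pvComb p q = pvComb p' q') : p = p' ∧ q = q' := by
  cases p; cases q; cases p'; cases q'
  simp [pvComb] at h
  obtain ⟨h1, h2, h3, h4⟩ := h
  exact ⟨by simp [h1, h3], by simp [h2, h4]⟩

theorem pvFlatMap_congr {α β : Type} {l : List α} {f g : α → List β}
    (h : ∀ a ∈ l, f a = g a) : l.flatMap f = l.flatMap g := by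
  induction l with
  | nil => simp
  | cons x xs ih => simp [h x (by simp), ih (fun a ha => h a (by simp [ha]))]

-- MAIN: dedup of the row-major product is the product of the per-axis dedups
theorem pvD_product (P Q : List (Int × Int)) :
    pvD (Q.flatMap (fun q => P.map (fun p => pvComb p q)))
      = (pvD Q).flatMap (fun q => (pvD P).map (fun p => pvComb p q)) := by
  induction Q using pvD_ind with
  | h0 => simp [pvD_nil]
  | h1 q Q' ih =>
    rw [List.flatMap_cons, pvD_append, pvD_cons, List.flatMap_cons]
    congr 1
    · exact pvD_map (fun p => pvComb p q) (fun a b h => (pvComb_inj a q b q h).1) P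
    · refine Eq.trans (congrArg pvD (pvFilter_flatMap_blocks Q' _ _ (fun q' => decide (q' ≠ q)) ?_)) ?_
      · intro q' _
        by_cases hq : q' = q
        · subst hq
          simp only [ne_eq, not_true_eq_false, decide_false, Bool.false_eq_true, if_false]
          apply List.filter_eq_nil_iff.2
          intro a ha
          simp [ha]
        · simp only [ne_eq, hq, not_false_eq_true, decide_true, if_true]
          apply List.filter_eq_self.2
          intro a ha
          simp only [List.mem_map] at ha
          obtain ⟨p, _, rfl⟩ := ha
          simp only [decide_not, Bool.not_eq_eq_eq_not, Bool.not_true, decide_eq_false_iff_not]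
          intro hmem
          simp only [List.mem_map] at hmem
          obtain ⟨p', _, hpq⟩ := hmem
          exact hq ((pvComb_inj p' q p q' hpq).2).symm
      · exact ih

-- interval of one axis: x ↦ (x1, x2) for bound W and tile size t
def pvFx (t W : Int) (x : Int) : Int × Int := (max 0 (min (x + t) W - t), min (x + t) W)

-- port A computes the dedup of the row-major product of per-axis intervals
theorem pvPortA_eq (H W t o : Int) :
    make_tile_coords H W t o
      = pvD (((PySem.List.pyRange 0 H (t - o)).map (pvFx t H)).flatMap
          (fun q => ((PySem.List.pyRange 0 W (t - o)).map (pvFx t W)).map (fun p => pvComb p q))) := by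
  unfold make_tile_coords
  simp only [PySem.List.foldl_append_singleton_eq_map, PySem.List.foldl_append_eq_flatMap]
  rw [pvFoldl_dedup]
  simp only [List.nil_append, PySem.Set.empty, List.not_mem_nil, not_false_eq_true, decide_true,
    List.filter_true]
  congr 1
  rw [List.flatMap_map]
  apply pvFlatMap_congr
  intro y _
  rw [List.map_map]
  rfl

-- port B computes the product of the per-axis dedups
theorem pvPortB_eq (H W t o : Int) :
    make_tile_coords_alt H W t o
      = (pvD ((PySem.List.pyRange 0 H (t - o)).map (pvFx t H))).flatMap
          (fun q => (pvD ((PySem.List.pyRange 0 W (t - o)).map (pvFx t W))).map (fun p => pvComb p q)) := by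
  unfold make_tile_coords_alt
  dsimp only
  rw [show ∀ l : List Int, (l.foldl (fun (su : PySem.Set (Int × Int) × List (Int × Int)) x =>
        if PySem.Set.contains su.1 (max 0 (min (x + t) W - t), min (x + t) W) then su
        else (PySem.Set.add su.1 (max 0 (min (x + t) W - t), min (x + t) W),
          su.2 ++ [(max 0 (min (x + t) W - t), min (x + t) W)])) (PySem.Set.empty, []))
      = ((l.map (pvFx t W)).foldl (fun su c =>
          if PySem.Set.contains su.1 c then su
          else (PySem.Set.add su.1 c, su.2 ++ [c])) (PySem.Set.empty, []))
    from fun l => (List.foldl_map (f := pvFx t W) (g := fun su c =>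
      if PySem.Set.contains su.1 c then su
      else (PySem.Set.add su.1 c, su.2 ++ [c]))).symm]
  rw [show ∀ l : List Int, (l.foldl (fun (su : PySem.Set (Int × Int) × List (Int × Int)) y =>
        if PySem.Set.contains su.1 (max 0 (min (y + t) H - t), min (y + t) H) then su
        else (PySem.Set.add su.1 (max 0 (min (y + t) H - t), min (y + t) H),
          su.2 ++ [(max 0 (min (y + t) H - t), min (y + t) H)])) (PySem.Set.empty, []))
      = ((l.map (pvFx t H)).foldl (fun su c =>
          if PySem.Set.contains su.1 c then su
          else (PySem.Set.add su.1 c, su.2 ++ [c])) (PySem.Set.empty, []))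
    from fun l => (List.foldl_map (f := pvFx t H) (g := fun su c =>
      if PySem.Set.contains su.1 c then su
      else (PySem.Set.add su.1 c, su.2 ++ [c]))).symm]
  rw [pvFoldl_dedup, pvFoldl_dedup]
  simp only [PySem.Set.empty, List.not_mem_nil, not_false_eq_true, decide_true, List.filter_true,
    List.nil_append]
  rfl

-- ===== VERDICT (by name: the statement is the Claim_ definition above) =====
theorem make_tile_coords_spec : Claim_equal_make_tile_coords := by
  intro H W t o _ _
  unfold Spec_make_tile_coords
  rw [pvPortA_eq, pvPortB_eq, pvD_product]
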